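-- pv_equiv track=rewrite | github.com/idan82labs/Sherman-QC | backend/zero_shot_bend_profile.py | _perturbation_count_consensus_range
-- ===== SOURCE A (Python) =====
-- from typing import Any, Dict, List, Optional, Sequence, Tuple
--
-- def _perturbation_count_consensus_range(
--     perturbation: Dict[str, Any],
-- ) -> Optional[Tuple[int, int]]:
--     counts = sorted(int(value) for value in (perturbation.get("counts") or []))
--     if len(counts) < 3:
--         return None
--     median = counts[len(counts) // 2]
--     inliers = [count for count in counts if abs(count - median) <= 1]
--     if len(inliers) < 2:
--         return None
--     return (min(inliers), max(inliers))
-- ===== SOURCE B (Python) =====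
-- def _med3(a, b, c):
--     if a <= b:
--         if b <= c:
--             return b
--         if a <= c:
--             return c
--         return a
--     if a <= c:
--         return a
--     if b <= c:
--         return c
--     return b
--
--
-- def _select(xs, k):
--     # k-th smallest (0-based) of xs; median-of-three quickselect.
--     p = _med3(xs[0], xs[len(xs) // 2], xs[-1])
--     less = [x for x in xs if x < p]
--     nl = len(less)
--     if k < nl:
--         return _select(less, k)
--     ne = sum(1 for x in xs if x == p)
--     if k < nl + ne:
--         return p
--     return _select([x for x in xs if x > p], k - nl - ne)
--
--
-- def _perturbation_count_consensus_range(perturbation):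
--     counts = [int(v) for v in (perturbation.get("counts") or [])]
--     n = len(counts)
--     if n < 3:
--         return None
--     m = _select(counts, n // 2)
--     lo, hi, total = m, m, 0
--     for c in counts:
--         if abs(c - m) <= 1:
--             if c < lo:
--                 lo = c
--             if c > hi:
--                 hi = c
--             total += 1
--     if total < 2:
--         return None
--     return (lo, hi)
-- ===== Notes on version B (the rewrite author's own statement) =====
-- stated objective: alternative
-- what changed: Replaces the full sort plus filter plus min/max passes by a median-of-three quickselect for the median and a single pass that accumulates the inlier count, min and max.
import Mathlib
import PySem

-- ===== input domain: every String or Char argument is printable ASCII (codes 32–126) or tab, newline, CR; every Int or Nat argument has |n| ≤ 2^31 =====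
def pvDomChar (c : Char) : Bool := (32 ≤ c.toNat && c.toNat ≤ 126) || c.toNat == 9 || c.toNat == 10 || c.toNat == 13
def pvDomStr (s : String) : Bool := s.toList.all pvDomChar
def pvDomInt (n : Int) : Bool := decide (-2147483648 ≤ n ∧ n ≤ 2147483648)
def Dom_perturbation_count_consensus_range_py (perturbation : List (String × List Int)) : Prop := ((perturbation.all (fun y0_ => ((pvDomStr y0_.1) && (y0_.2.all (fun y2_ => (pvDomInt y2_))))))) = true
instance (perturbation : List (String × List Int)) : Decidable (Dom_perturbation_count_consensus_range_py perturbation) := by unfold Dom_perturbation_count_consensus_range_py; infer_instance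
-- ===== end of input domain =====

-- B replaces A's full sort (then filter, min and max passes) by a median-of-three
-- quickselect for the median plus one accumulating pass over the raw counts (alternative algorithm).

-- ===== PORT A =====
def perturbation_count_consensus_range_py (perturbation : List (String × List Int)) : Option (Int × Int) :=
  -- counts = sorted(int(value) for value in (perturbation.get("counts") or []))
  let counts := PySem.List.sorted (((PySem.Dict.mk perturbation).get? "counts").getD []) (fun x => x) false
  if counts.length < 3 then none
  else
    -- median = counts[len(counts) // 2]  (index in range: length ≥ 3)
    let median := counts.getD (counts.length / 2) 0
    let inliers := counts.filter (fun c => decide (|c - median| ≤ 1))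
    if inliers.length < 2 then none
    else some ((PySem.List.min? inliers (fun x => x)).getD 0, (PySem.List.max? inliers (fun x => x)).getD 0)

-- ===== PORT B =====
def pvMed3 (a b c : Int) : Int :=
  if a ≤ b then
    if b ≤ c then b else if a ≤ c then c else a
  else
    if a ≤ c then a else if b ≤ c then c else b

theorem pvMed3_mem (a b c : Int) : pvMed3 a b c = a ∨ pvMed3 a b c = b ∨ pvMed3 a b c = c := by
  unfold pvMed3; split_ifs <;> simp

-- the pivot is one of three elements of x :: t (used by pvSelect's termination proof)
theorem pv_pivot_mem (x : Int) (t : List Int) :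
    pvMed3 x ((x :: t).getD ((x :: t).length / 2) x) ((x :: t).getD ((x :: t).length - 1) x) ∈ x :: t := by
  rcases pvMed3_mem x ((x :: t).getD ((x :: t).length / 2) x) ((x :: t).getD ((x :: t).length - 1) x) with h | h | h <;> rw [h]
  · exact List.mem_cons_self
  · rw [List.getD_eq_getElem _ _ (by simp; omega)]; exact List.getElem_mem _
  · rw [List.getD_eq_getElem _ _ (by simp)]; exact List.getElem_mem _

theorem pv_filter_lt_of_mem_not {l : List Int} {p : Int → Bool} {a : Int}
    (h : a ∈ l) (hp : p a = false) : (l.filter p).length < l.length :=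
  List.length_filter_lt_length_iff_exists.mpr ⟨a, h, by simp [hp]⟩

def pvSelect : List Int → Nat → Int
  | [], _ => 0   -- unreachable totality guard: Python only calls _select with k < len(xs)
  | x :: t, k =>
    let p := pvMed3 x ((x :: t).getD ((x :: t).length / 2) x) ((x :: t).getD ((x :: t).length - 1) x)
    let less := (x :: t).filter (fun y => decide (y < p))
    let nl := less.length
    if k < nl then pvSelect less k
    else
      let ne := ((x :: t).filter (fun y => decide (y = p))).length
      if k < nl + ne then p
      else pvSelect ((x :: t).filter (fun y => decide (p < y))) (k - nl - ne)
termination_by xs _ => xs.length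
decreasing_by
  · exact pv_filter_lt_of_mem_not (pv_pivot_mem x t) (by simp)
  · exact pv_filter_lt_of_mem_not (pv_pivot_mem x t) (by simp)

def perturbation_count_consensus_range_py_alt (perturbation : List (String × List Int)) : Option (Int × Int) :=
  let counts := ((PySem.Dict.mk perturbation).get? "counts").getD []
  let n := counts.length
  if n < 3 then none
  else
    let m := pvSelect counts (n / 2)
    let r := counts.foldl (fun (s : Int × Int × Int) c =>
      if |c - m| ≤ 1 then
        (if c < s.1 then c else s.1, if s.2.1 < c then c else s.2.1, s.2.2 + 1)
      else s) (m, m, (0 : Int))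
    if r.2.2 < 2 then none else some (r.1, r.2.1)

-- ===== PRECONDITION & SPEC =====
def Spec_perturbation_count_consensus_range_py (perturbation : List (String × List Int)) (out : Option (Int × Int)) : Prop := out = perturbation_count_consensus_range_py_alt perturbation
instance (perturbation : List (String × List Int)) (out : Option (Int × Int)) : Decidable (Spec_perturbation_count_consensus_range_py perturbation out) := by unfold Spec_perturbation_count_consensus_range_py; infer_instance

-- ===== CLAIM (what is proved, stated in full; the proofs are below) =====
def Claim_equal_perturbation_count_consensus_range_py : Prop := ∀ (perturbation : List (String × List Int)), Dom_perturbation_count_consensus_range_py perturbation → Spec_perturbation_count_consensus_range_py perturbation (perturbation_count_consensus_range_py perturbation)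

-- ===== LEMMAS AND PROOFS =====

-- partition of a list's length by comparison with a pivot
theorem pv_countP_partition (p : Int) (l : List Int) :
    l.countP (fun y => decide (y < p)) + l.countP (fun y => decide (y = p))
      + l.countP (fun y => decide (p < y)) = l.length := by
  induction l with
  | nil => simp
  | cons a t ih =>
    simp only [List.countP_cons, List.length_cons]
    split_ifs <;> (try simp_all) <;> omega

theorem pv_countP_le_split (p : Int) (l : List Int) :
    l.countP (fun y => decide (y ≤ p)) =
      l.countP (fun y => decide (y < p)) + l.countP (fun y => decide (y = p)) := by
  induction l with
  | nil => simp
  | cons a t ih =>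
    simp only [List.countP_cons, ih]
    split_ifs <;> (try simp_all) <;> omega

-- splitting a count below r at a smaller pivot p
theorem pv_countP_lt_pivot (p r : Int) (hpr : p < r) (l : List Int) :
    l.countP (fun y => decide (y < r)) =
      l.countP (fun y => decide (y < p)) + l.countP (fun y => decide (y = p))
        + l.countP (fun y => decide (y < r) && decide (p < y)) := by
  induction l with
  | nil => simp
  | cons a t ih =>
    simp only [List.countP_cons, ih]
    split_ifs <;> (try simp_all) <;> omega

theorem pv_countP_le_pivot (p r : Int) (hpr : p < r) (l : List Int) :
    l.countP (fun y => decide (y ≤ r)) =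
      l.countP (fun y => decide (y < p)) + l.countP (fun y => decide (y = p))
        + l.countP (fun y => decide (y ≤ r) && decide (p < y)) := by
  induction l with
  | nil => simp
  | cons a t ih =>
    simp only [List.countP_cons, ih]
    split_ifs <;> (try simp_all) <;> omega

-- pvSelect returns an element of xs whose rank brackets k
theorem pvSelect_rank : ∀ (n : Nat) (xs : List Int) (k : Nat), xs.length ≤ n → k < xs.length →
    pvSelect xs k ∈ xs ∧
    xs.countP (fun y => decide (y < pvSelect xs k)) ≤ k ∧
    k < xs.countP (fun y => decide (y ≤ pvSelect xs k)) := by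
  intro n
  induction n with
  | zero => intro xs k h hk; omega
  | succ n ih =>
    intro xs k hlen hk
    match xs with
    | [] => simp at hk
    | x :: t =>
      rw [pvSelect]
      set p := pvMed3 x ((x :: t).getD ((x :: t).length / 2) x) ((x :: t).getD ((x :: t).length - 1) x) with hpdef
      have hpm : p ∈ x :: t := pv_pivot_mem x t
      have hnl : ((x :: t).filter (fun y => decide (y < p))).length
          = (x :: t).countP (fun y => decide (y < p)) := by rw [List.countP_eq_length_filter]
      have hne : ((x :: t).filter (fun y => decide (y = p))).length
          = (x :: t).countP (fun y => decide (y = p)) := by rw [List.countP_eq_length_filter]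
      have hng : ((x :: t).filter (fun y => decide (p < y))).length
          = (x :: t).countP (fun y => decide (p < y)) := by rw [List.countP_eq_length_filter]
      have hpart := pv_countP_partition p (x :: t)
      by_cases h1 : k < ((x :: t).filter (fun y => decide (y < p))).length
      · rw [if_pos h1]
        have hlt : ((x :: t).filter (fun y => decide (y < p))).length < (x :: t).length :=
          pv_filter_lt_of_mem_not hpm (by simp)
        obtain ⟨hmem, hlo, hhi⟩ :=
          ih ((x :: t).filter (fun y => decide (y < p))) k (by omega) h1
        set r := pvSelect ((x :: t).filter (fun y => decide (y < p))) k with hrdef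
        have hrx : r ∈ x :: t := (List.mem_filter.mp hmem).1
        have hrp : r < p := by have := (List.mem_filter.mp hmem).2; simpa using this
        refine ⟨hrx, ?_, ?_⟩
        · have heq : ((x :: t).filter (fun y => decide (y < p))).countP (fun y => decide (y < r))
              = (x :: t).countP (fun y => decide (y < r)) := by
            rw [List.countP_filter]
            refine List.countP_congr ?_
            intro a _
            by_cases hy : a < r
            · simp [hy, hy.trans hrp]
            · simp [hy]
          omega
        · have heq : ((x :: t).filter (fun y => decide (y < p))).countP (fun y => decide (y ≤ r))
              = (x :: t).countP (fun y => decide (y ≤ r)) := by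
            rw [List.countP_filter]
            refine List.countP_congr ?_
            intro a _
            by_cases hy : a ≤ r
            · simp [hy, lt_of_le_of_lt hy hrp]
            · simp [hy]
          omega
      · rw [if_neg h1]
        by_cases h2 : k < ((x :: t).filter (fun y => decide (y < p))).length
            + ((x :: t).filter (fun y => decide (y = p))).length
        · rw [if_pos h2]
          refine ⟨hpm, by omega, ?_⟩
          rw [pv_countP_le_split]
          omega
        · rw [if_neg h2]
          have hlt : ((x :: t).filter (fun y => decide (p < y))).length < (x :: t).length :=
            pv_filter_lt_of_mem_not hpm (by simp)
          have hk2 : k - ((x :: t).filter (fun y => decide (y < p))).length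
              - ((x :: t).filter (fun y => decide (y = p))).length
              < ((x :: t).filter (fun y => decide (p < y))).length := by omega
          obtain ⟨hmem, hlo, hhi⟩ :=
            ih ((x :: t).filter (fun y => decide (p < y))) _ (by omega) hk2
          set r := pvSelect ((x :: t).filter (fun y => decide (p < y)))
              (k - ((x :: t).filter (fun y => decide (y < p))).length
                 - ((x :: t).filter (fun y => decide (y = p))).length) with hrdef
          have hrx : r ∈ x :: t := (List.mem_filter.mp hmem).1
          have hrp : p < r := by have := (List.mem_filter.mp hmem).2; simpa using this
          have heqlt : ((x :: t).filter (fun y => decide (p < y))).countP (fun y => decide (y < r))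
              = (x :: t).countP (fun y => decide (y < r) && decide (p < y)) :=
            List.countP_filter
          have heqle : ((x :: t).filter (fun y => decide (p < y))).countP (fun y => decide (y ≤ r))
              = (x :: t).countP (fun y => decide (y ≤ r) && decide (p < y)) :=
            List.countP_filter
          have hsplit1 := pv_countP_lt_pivot p r hrp (x :: t)
          have hsplit2 := pv_countP_le_pivot p r hrp (x :: t)
          exact ⟨hrx, by omega, by omega⟩

-- in a ≤-sorted list, the rank bracket determines the k-th element
theorem pv_rank_unique (s : List Int) (hs : s.Pairwise (· ≤ ·)) (k : Nat) (hk : k < s.length)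
    (v : Int) (h1 : s.countP (fun y => decide (y < v)) ≤ k)
    (h2 : k < s.countP (fun y => decide (y ≤ v))) : s[k] = v := by
  have hpg := List.pairwise_iff_getElem.mp hs
  rcases lt_trichotomy (s[k]) v with h | h | h
  · exfalso
    have hsplit : s.countP (fun y => decide (y < v))
        = (s.take (k + 1)).countP (fun y => decide (y < v))
          + (s.drop (k + 1)).countP (fun y => decide (y < v)) := by
      conv_lhs => rw [← List.take_append_drop (k + 1) s]
      rw [List.countP_append]
    have htake : (s.take (k + 1)).countP (fun y => decide (y < v)) = (s.take (k + 1)).length := by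
      rw [List.countP_eq_length]
      intro a ha
      obtain ⟨i, hi, rfl⟩ := List.mem_iff_getElem.mp ha
      rw [List.getElem_take]
      have hik : i < k + 1 := lt_of_lt_of_le hi (by simp)
      rcases Nat.lt_or_ge i k with hik' | hik'
      · have := hpg i k (by omega) hk hik'
        simp only [decide_eq_true_eq]
        omega
      · have : i = k := by omega
        subst this
        simp only [decide_eq_true_eq]
        omega
    have hlen : (s.take (k + 1)).length = k + 1 := by
      rw [List.length_take]; omega
    omega
  · exact h
  · exfalso
    have hsplit : s.countP (fun y => decide (y ≤ v))
        = (s.take k).countP (fun y => decide (y ≤ v))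
          + (s.drop k).countP (fun y => decide (y ≤ v)) := by
      conv_lhs => rw [← List.take_append_drop k s]
      rw [List.countP_append]
    have hdrop : (s.drop k).countP (fun y => decide (y ≤ v)) = 0 := by
      rw [List.countP_eq_zero]
      intro a ha
      obtain ⟨i, hi, rfl⟩ := List.mem_iff_getElem.mp ha
      have hi' : i < s.length - k := by simpa using hi
      simp only [List.getElem_drop, decide_eq_true_eq]
      rcases Nat.eq_zero_or_pos i with rfl | hpos
      · simp only [Nat.add_zero]
        omega
      · have := hpg k (k + i) (by omega) (by omega) (by omega)
        omega
    have hlen : (s.take k).length = k := by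
      rw [List.length_take]; omega
    have hle := List.countP_le_length (l := s.take k) (p := fun y => decide (y ≤ v))
    omega

theorem pv_foldl_min_eq (F I : List Int) (hperm : F.Perm I) (m : Int) (hm : m ∈ F) :
    some (F.foldl min m) = PySem.List.min? I (fun x => x) := by
  have hIne : I ≠ [] := by
    intro h; subst h
    exact (List.ne_nil_of_mem hm) hperm.eq_nil
  obtain ⟨h, t, rfl⟩ := List.exists_cons_of_ne_nil hIne
  rw [PySem.List.min?_id_cons]
  have hmin : PySem.List.min? (h :: t) (fun x => x) = some (t.foldl min h) :=
    PySem.List.min?_id_cons h t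
  have hvI : t.foldl min h ∈ h :: t := PySem.List.min?_mem hmin
  have hvmin : ∀ y ∈ h :: t, t.foldl min h ≤ y := fun y hy => PySem.List.min?_isMin hmin y hy
  have hu := PySem.List.foldl_min_le F m
  have humem : F.foldl min m ∈ F := by
    rcases PySem.List.foldl_min_mem F m with h' | h'
    · rw [h']; exact hm
    · exact h'
  congr 1
  exact le_antisymm (hu.2 _ (hperm.mem_iff.mpr hvI)) (hvmin _ (hperm.mem_iff.mp humem))

theorem pv_foldl_max_eq (F I : List Int) (hperm : F.Perm I) (m : Int) (hm : m ∈ F) :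
    some (F.foldl max m) = PySem.List.max? I (fun x => x) := by
  have hIne : I ≠ [] := by
    intro h; subst h
    exact (List.ne_nil_of_mem hm) hperm.eq_nil
  obtain ⟨h, t, rfl⟩ := List.exists_cons_of_ne_nil hIne
  rw [PySem.List.max?_id_cons]
  have hmax : PySem.List.max? (h :: t) (fun x => x) = some (t.foldl max h) :=
    PySem.List.max?_id_cons h t
  have hvI : t.foldl max h ∈ h :: t := PySem.List.max?_mem hmax
  have hvmax : ∀ y ∈ h :: t, y ≤ t.foldl max h := fun y hy => PySem.List.max?_isMax hmax y hy
  have hu := PySem.List.le_foldl_max F m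
  have humem : F.foldl max m ∈ F := by
    rcases PySem.List.foldl_max_mem F m with h' | h'
    · rw [h']; exact hm
    · exact h'
  congr 1
  exact le_antisymm (hvmax _ (hperm.mem_iff.mp humem)) (hu.2 _ (hperm.mem_iff.mpr hvI))

theorem pv_fold_split (F : List Int) (a b t : Int) :
    F.foldl (fun s (c : Int) => (min s.1 c, max s.2.1 c, s.2.2 + 1)) (a, b, t)
      = (F.foldl min a, F.foldl max b, t + F.length) := by
  induction F generalizing a b t with
  | nil => simp
  | cons h tl ih =>
    simp only [List.foldl_cons, ih, List.length_cons]
    refine Prod.ext rfl (Prod.ext rfl ?_)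
    push_cast
    ring

-- the whole body, on the shared counts list
theorem pv_core (cs : List Int) :
    (if (PySem.List.sorted cs (fun x => x) false).length < 3 then none
     else
       if ((PySem.List.sorted cs (fun x => x) false).filter (fun c =>
             decide (|c - (PySem.List.sorted cs (fun x => x) false).getD
               ((PySem.List.sorted cs (fun x => x) false).length / 2) 0| ≤ 1))).length < 2 then none
       else some
         (((PySem.List.min? ((PySem.List.sorted cs (fun x => x) false).filter (fun c =>
             decide (|c - (PySem.List.sorted cs (fun x => x) false).getD
               ((PySem.List.sorted cs (fun x => x) false).length / 2) 0| ≤ 1))) (fun x => x)).getD 0),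
          ((PySem.List.max? ((PySem.List.sorted cs (fun x => x) false).filter (fun c =>
             decide (|c - (PySem.List.sorted cs (fun x => x) false).getD
               ((PySem.List.sorted cs (fun x => x) false).length / 2) 0| ≤ 1))) (fun x => x)).getD 0)))
    =
    (if cs.length < 3 then none
     else
       if (cs.foldl (fun (s : Int × Int × Int) c =>
            if |c - pvSelect cs (cs.length / 2)| ≤ 1 then
              (if c < s.1 then c else s.1, if s.2.1 < c then c else s.2.1, s.2.2 + 1)
            else s) (pvSelect cs (cs.length / 2), pvSelect cs (cs.length / 2), (0 : Int))).2.2 < 2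
       then none
       else some
         ((cs.foldl (fun (s : Int × Int × Int) c =>
            if |c - pvSelect cs (cs.length / 2)| ≤ 1 then
              (if c < s.1 then c else s.1, if s.2.1 < c then c else s.2.1, s.2.2 + 1)
            else s) (pvSelect cs (cs.length / 2), pvSelect cs (cs.length / 2), (0 : Int))).1,
          (cs.foldl (fun (s : Int × Int × Int) c =>
            if |c - pvSelect cs (cs.length / 2)| ≤ 1 then
              (if c < s.1 then c else s.1, if s.2.1 < c then c else s.2.1, s.2.2 + 1)
            else s) (pvSelect cs (cs.length / 2), pvSelect cs (cs.length / 2), (0 : Int))).2.1)) := by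
  have hns : (PySem.List.sorted cs (fun x => x) false).length = cs.length :=
    PySem.List.length_sorted cs (fun x => x) false
  by_cases h3 : cs.length < 3
  · rw [if_pos (by omega), if_pos h3]
  · rw [if_neg (by omega), if_neg h3]
    set m := pvSelect cs (cs.length / 2) with hm
    have hk : cs.length / 2 < cs.length := Nat.div_lt_self (by omega) (by omega)
    obtain ⟨hmem, hlo, hhi⟩ := pvSelect_rank cs.length cs (cs.length / 2) le_rfl hk
    have hperm : (PySem.List.sorted cs (fun x => x) false).Perm cs :=
      PySem.List.sorted_perm cs (fun x => x) false
    have hpair : (PySem.List.sorted cs (fun x => x) false).Pairwise (· ≤ ·) := by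
      have := PySem.List.sorted_pairwise (xs := cs) (key := fun x => x)
      simpa using this
    have hkl : cs.length / 2 < (PySem.List.sorted cs (fun x => x) false).length := by omega
    have hmed : (PySem.List.sorted cs (fun x => x) false)[cs.length / 2]'hkl = m :=
      pv_rank_unique _ hpair _ hkl m (by rw [hperm.countP_eq]; exact hlo)
        (by rw [hperm.countP_eq]; exact hhi)
    have hmedD : (PySem.List.sorted cs (fun x => x) false).getD
        ((PySem.List.sorted cs (fun x => x) false).length / 2) 0 = m := by
      rw [hns, List.getD_eq_getElem _ _ hkl, hmed]
    simp only [hmedD]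
    have hstep : (fun (s : Int × Int × Int) (c : Int) =>
        if |c - m| ≤ 1 then
          (if c < s.1 then c else s.1, if s.2.1 < c then c else s.2.1, s.2.2 + 1)
        else s)
        = fun (s : Int × Int × Int) (c : Int) =>
          if |c - m| ≤ 1 then (min s.1 c, max s.2.1 c, s.2.2 + 1) else s := by
      funext s c
      by_cases h : |c - m| ≤ 1
      · simp only [if_pos h, min_def, max_def]
        refine Prod.ext ?_ (Prod.ext ?_ rfl) <;> dsimp <;> split_ifs <;> omega
      · simp only [if_neg h]
    rw [hstep]
    rw [PySem.List.foldl_ite_eq_foldl_filter (p := fun c : Int => |c - m| ≤ 1)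
      (f := fun (s : Int × Int × Int) (c : Int) => (min s.1 c, max s.2.1 c, s.2.2 + 1))]
    rw [pv_fold_split]
    have hFI : (cs.filter (fun c => decide (|c - m| ≤ 1))).Perm
        ((PySem.List.sorted cs (fun x => x) false).filter (fun c => decide (|c - m| ≤ 1))) :=
      (hperm.filter _).symm
    have hmF : m ∈ cs.filter (fun c => decide (|c - m| ≤ 1)) :=
      List.mem_filter.mpr ⟨hmem, by simp⟩
    have hlenFI := hFI.length_eq
    by_cases h2 : ((PySem.List.sorted cs (fun x => x) false).filter
        (fun c => decide (|c - m| ≤ 1))).length < 2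
    · rw [if_pos h2, if_pos (by dsimp only; omega)]
    · rw [if_neg h2, if_neg (by dsimp only; omega)]
      rw [← pv_foldl_min_eq _ _ hFI m hmF, ← pv_foldl_max_eq _ _ hFI m hmF]
      simp

-- ===== VERDICT (by name: the statement is the Claim_ definition above) =====
theorem perturbation_count_consensus_range_py_spec : Claim_equal_perturbation_count_consensus_range_py := by
  intro perturbation _
  exact pv_core (((PySem.Dict.mk perturbation).get? "counts").getD [])
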